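-- pv_equiv track=rewrite | github.com/EitanMohorade/IP-UBA-ejercicios | Ejercicios/Python/Guia_6/ejer_4.py | peso_pino
-- ===== SOURCE A (Python) =====
-- def peso_pino(altura:int)->int:
--     altura_en_cm : int = altura * 100
--     peso : int = 0
--     while(altura_en_cm > 0):
--         if (altura_en_cm <= 300):
--             peso += 3
--         elif(altura_en_cm > 300):
--             peso += 2
--         altura_en_cm -= 1
--     return peso
-- ===== SOURCE B (Python) =====
-- def peso_pino(altura: int) -> int:
--     h = altura * 100
--     if h <= 0:
--         return 0
--     return 3 * min(h, 300) + 2 * max(h - 300, 0)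
-- ===== Notes on version B (the rewrite author's own statement) =====
-- stated objective: faster
-- what changed: Replaced the per-centimetre countdown loop with a closed-form formula: 3 per cm up to 300 cm plus 2 per cm above.
import Mathlib
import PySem

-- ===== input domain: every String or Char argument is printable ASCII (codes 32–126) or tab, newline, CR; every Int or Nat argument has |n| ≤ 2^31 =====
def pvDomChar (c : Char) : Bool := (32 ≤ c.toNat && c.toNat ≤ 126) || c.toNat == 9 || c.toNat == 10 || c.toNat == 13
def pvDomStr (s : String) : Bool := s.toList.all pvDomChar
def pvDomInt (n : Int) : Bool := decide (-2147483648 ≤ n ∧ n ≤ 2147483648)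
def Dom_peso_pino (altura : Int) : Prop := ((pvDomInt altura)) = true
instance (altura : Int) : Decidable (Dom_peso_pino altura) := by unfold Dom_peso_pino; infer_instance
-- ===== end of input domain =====

-- B replaces A's per-centimetre countdown loop with a closed-form O(1) formula (faster, asymptotic).


-- ===== PORT A =====
-- while(altura_en_cm > 0): add 3 if ≤ 300 else 2, decrement; transliterated as structural recursion on the counter
def pesoLoop (altura_en_cm : Int) (peso : Int) : Int :=
  if h : altura_en_cm > 0 then
    pesoLoop (altura_en_cm - 1) (peso + (if altura_en_cm ≤ 300 then 3 else 2))
  else peso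
termination_by altura_en_cm.toNat
decreasing_by omega

def peso_pino (altura : Int) : Int :=
  pesoLoop (altura * 100) 0

-- ===== PORT B =====
def peso_pino_alt (altura : Int) : Int :=
  let h := altura * 100
  if h ≤ 0 then 0 else 3 * min h 300 + 2 * max (h - 300) 0

-- ===== PRECONDITION & SPEC =====
def Spec_peso_pino (altura : Int) (out : Int) : Prop := out = peso_pino_alt altura
instance (altura : Int) (out : Int) : Decidable (Spec_peso_pino altura out) := by unfold Spec_peso_pino; infer_instance

-- ===== CLAIM (what is proved, stated in full; the proofs are below) =====
def Claim_equal_peso_pino : Prop := ∀ (altura : Int), Dom_peso_pino altura → Spec_peso_pino altura (peso_pino altura)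

-- ===== LEMMAS AND PROOFS =====
theorem pesoLoop_closed (n : Nat) : ∀ (h p : Int), h.toNat = n →
    pesoLoop h p = p + (if h ≤ 0 then 0 else 3 * min h 300 + 2 * max (h - 300) 0) := by
  induction n with
  | zero =>
    intro h p hn
    rw [pesoLoop]
    have : ¬ h > 0 := by omega
    simp [this]
  | succ k ih =>
    intro h p hn
    rw [pesoLoop]
    have hpos : h > 0 := by omega
    simp only [hpos]
    rw [ih (h - 1) _ (by omega)]
    by_cases h3 : h ≤ 300 <;> simp [h3] <;> omega

-- ===== VERDICT (by name: the statement is the Claim_ definition above) =====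
theorem peso_pino_spec : Claim_equal_peso_pino := by
  intro altura _
  unfold Spec_peso_pino peso_pino peso_pino_alt
  rw [pesoLoop_closed (altura * 100).toNat _ _ rfl]
  simp
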